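-- pv_equiv track=rewrite | github.com/devin-fisher/treadstone | lib/timeline_analysis/timeline_lib.py | end_list_function
-- ===== SOURCE A (Python) =====
-- def end_list_function(kill_list, counter_list, start_list):
--     end_list = []
--     b = 0
--     len_start_list = len(start_list)
--     for a in range(0,len_start_list):
--         end_counter = a + b + counter_list[a]
--         end_list.append({})
--         end_list[a]['time'] = kill_list[end_counter]["time"]
--         end_list[a]['eventType'] = kill_list[end_counter]["eventType"]
--         b = b + counter_list[a]
--
--     return end_list, counter_list
-- ===== SOURCE B (Python) =====
-- def end_list_function(kill_list, counter_list, start_list):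
--     # Walk the indices BACK-TO-FRONT: start from the last end position
--     # (n-1 + total of the first n counters) and step a cursor backwards by
--     # 1 + counter_list[a]; collect events in reverse and flip once at the end.
--     n = len(start_list)
--     pos = n - 1 + sum(counter_list[:n])
--     rev = []
--     for a in range(n - 1, -1, -1):
--         ev = kill_list[pos]
--         rev.append({'time': ev['time'], 'eventType': ev['eventType']})
--         pos -= 1 + counter_list[a]
--     rev.reverse()
--     return rev, counter_list
-- ===== Notes on version B (the rewrite author's own statement) =====
-- stated objective: alternative
-- what changed: B traverses the indices in the opposite direction: it starts from the last end position (n-1 plus the total of the first n counters), walks a single cursor backwards subtracting 1+counter_list[a] each step, collects the events in reverse and flips the list once, instead of A's forward loop that adds up a running accumulator and indexes a + b + counter_list[a].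
import Mathlib
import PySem

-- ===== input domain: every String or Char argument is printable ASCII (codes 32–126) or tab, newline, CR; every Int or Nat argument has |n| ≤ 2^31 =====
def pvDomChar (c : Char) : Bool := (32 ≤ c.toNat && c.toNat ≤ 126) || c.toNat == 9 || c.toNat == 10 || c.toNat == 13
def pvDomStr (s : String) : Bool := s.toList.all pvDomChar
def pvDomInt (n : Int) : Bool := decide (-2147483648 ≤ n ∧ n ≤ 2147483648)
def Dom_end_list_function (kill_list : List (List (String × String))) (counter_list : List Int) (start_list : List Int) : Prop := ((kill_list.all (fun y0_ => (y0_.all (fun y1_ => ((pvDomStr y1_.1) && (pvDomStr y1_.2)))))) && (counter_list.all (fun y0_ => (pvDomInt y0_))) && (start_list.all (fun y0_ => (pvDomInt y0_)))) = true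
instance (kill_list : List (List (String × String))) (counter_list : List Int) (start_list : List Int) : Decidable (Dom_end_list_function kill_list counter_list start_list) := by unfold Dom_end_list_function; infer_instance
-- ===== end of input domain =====

-- B traverses the indices back-to-front with a single subtracting cursor and one final reverse, instead of A's forward loop with an additive accumulator; alternative decomposition, same cost.


-- shared helper: Python dict lookup d[k] with a default (first match in the association list)
def pvLookupD (d : List (String × String)) (k : String) (dflt : String) : String :=
  (d.lookup k).getD dflt

-- ===== PORT A =====
def end_list_function (kill_list : List (List (String × String))) (counter_list : List Int) (start_list : List Int) : (List (List (String × String))) × List Int :=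
  let step : (List (List (String × String)) × Int) → Int → (List (List (String × String)) × Int) :=
    fun st a =>
      let c := PySem.List.pyGetD counter_list a 0
      let ec := a + st.2 + c
      let d := PySem.List.pyGetD kill_list ec []
      (st.1 ++ [[("time", pvLookupD d "time" ""), ("eventType", pvLookupD d "eventType" "")]], st.2 + c)
  let r := (PySem.List.pyRange 0 (start_list.length : Int) 1).foldl step ([], 0)
  (r.1, counter_list)

-- ===== PORT B =====
def end_list_function_alt (kill_list : List (List (String × String))) (counter_list : List Int) (start_list : List Int) : (List (List (String × String))) × List Int :=
  let n : Int := start_list.length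
  let pos0 : Int := n - 1 + (PySem.List.slice counter_list none (some n)).sum
  let r := (PySem.List.pyRange (n - 1) (-1) (-1)).foldl
    (fun (st : List (List (String × String)) × Int) a =>
      let ev := PySem.List.pyGetD kill_list st.2 []
      (st.1 ++ [[("time", pvLookupD ev "time" ""), ("eventType", pvLookupD ev "eventType" "")]],
       st.2 - (1 + PySem.List.pyGetD counter_list a 0))) ([], pos0)
  (r.1.reverse, counter_list)

-- ===== PRECONDITION & SPEC =====
-- Pre_ excludes exactly the inputs where Python A raises: an a with counter_list[a] missing
-- (IndexError), an end index outside kill_list (IndexError), or an end event lacking the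
-- "time"/"eventType" keys (KeyError).
def Pre_end_list_function (kill_list : List (List (String × String))) (counter_list : List Int) (start_list : List Int) : Prop :=
  start_list.length ≤ counter_list.length ∧
  ∀ a ∈ List.range start_list.length,
    PySem.Raise.InRange kill_list.length ((a : Int) + ((counter_list.take (a+1)).sum)) ∧
    ((PySem.List.pyGetD kill_list ((a : Int) + ((counter_list.take (a+1)).sum)) []).lookup "time").isSome = true ∧
    ((PySem.List.pyGetD kill_list ((a : Int) + ((counter_list.take (a+1)).sum)) []).lookup "eventType").isSome = true
instance (kill_list : List (List (String × String))) (counter_list : List Int) (start_list : List Int) : Decidable (Pre_end_list_function kill_list counter_list start_list) := by unfold Pre_end_list_function; infer_instance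

def pvWitness_end_list_function : (List (List (String × String))) × List Int × List Int :=
  ([[("time", "t0"), ("eventType", "e0")]], [0], [7])

def Spec_end_list_function (kill_list : List (List (String × String))) (counter_list : List Int) (start_list : List Int) (out : (List (List (String × String))) × List Int) : Prop := out = end_list_function_alt kill_list counter_list start_list
instance (kill_list : List (List (String × String))) (counter_list : List Int) (start_list : List Int) (out : (List (List (String × String))) × List Int) : Decidable (Spec_end_list_function kill_list counter_list start_list out) := by unfold Spec_end_list_function; infer_instance

-- ===== CLAIM (what is proved, stated in full; the proofs are below) =====
def Claim_equal_end_list_function : Prop := ∀ (kill_list : List (List (String × String))) (counter_list : List Int) (start_list : List Int), Dom_end_list_function kill_list counter_list start_list → Pre_end_list_function kill_list counter_list start_list → Spec_end_list_function kill_list counter_list start_list (end_list_function kill_list counter_list start_list)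

-- ===== LEMMAS AND PROOFS =====

-- the entry produced for index a, expressed through the prefix sums of counter_list
def pvEntry (kill_list : List (List (String × String))) (counter_list : List Int) (a : Nat) : List (String × String) :=
  let d := PySem.List.pyGetD kill_list ((a : Int) + ((counter_list.take (a+1)).sum)) []
  [("time", pvLookupD d "time" ""), ("eventType", pvLookupD d "eventType" "")]

-- A's forward loop, characterised
lemma pv_A_fold (kl : List (List (String × String))) (cl : List Int) :
    ∀ n : Nat, n ≤ cl.length →
    (PySem.List.pyRange 0 (n : Int) 1).foldl
      (fun (st : List (List (String × String)) × Int) a =>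
        let c := PySem.List.pyGetD cl a 0
        let ec := a + st.2 + c
        let d := PySem.List.pyGetD kl ec []
        (st.1 ++ [[("time", pvLookupD d "time" ""), ("eventType", pvLookupD d "eventType" "")]], st.2 + c))
      ([], 0)
    = ((List.range n).map (pvEntry kl cl), (cl.take n).sum) := by
  intro n hn
  induction n with
  | zero => simp [PySem.List.pyRange_one_eq_nil]
  | succ m ih =>
    have hm : m ≤ cl.length := Nat.le_of_succ_le hn
    have hsplit : PySem.List.pyRange 0 ((m + 1 : Nat) : Int) 1
        = PySem.List.pyRange 0 (m : Int) 1 ++ [(m : Int)] := by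
      push_cast
      exact PySem.List.pyRange_one_succ_right (by positivity)
    rw [hsplit, List.foldl_append, ih hm]
    have hmlt : m < cl.length := hn
    have hc : PySem.List.pyGetD cl (m : Int) 0 = cl[m] := by
      rw [PySem.List.pyGetD_natCast]
      exact List.getD_eq_getElem cl 0 hmlt
    have hsum : (cl.take (m+1)).sum = (cl.take m).sum + cl[m] :=
      List.sum_take_succ cl m hmlt
    simp only [List.foldl_cons, List.foldl_nil, hc, List.range_succ, List.map_append,
      List.map_cons, List.map_nil, pvEntry, Prod.mk.injEq]
    constructor
    · congr 1
      simp [hsum, add_assoc]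
    · omega

-- B's backward cursor walk, characterised: starting at position (m-1)+Σ cl[:m],
-- it emits the entries for indices m-1, …, 0 in that order and ends at position -1.
lemma pv_B_fold (kl : List (List (String × String))) (cl : List Int) :
    ∀ m : Nat, m ≤ cl.length → ∀ acc : List (List (String × String)),
    (PySem.List.pyRange ((m : Int) - 1) (-1) (-1)).foldl
      (fun (st : List (List (String × String)) × Int) a =>
        let ev := PySem.List.pyGetD kl st.2 []
        (st.1 ++ [[("time", pvLookupD ev "time" ""), ("eventType", pvLookupD ev "eventType" "")]],
         st.2 - (1 + PySem.List.pyGetD cl a 0)))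
      (acc, (m : Int) - 1 + (cl.take m).sum)
    = (acc ++ ((List.range m).map (pvEntry kl cl)).reverse, -1) := by
  intro m
  induction m with
  | zero =>
    intro _ acc
    rw [PySem.List.pyRange_neg_one_eq_nil (by norm_num)]
    simp
  | succ m ih =>
    intro hm acc
    have hmlt : m < cl.length := hm
    have hcons : PySem.List.pyRange (((m + 1 : Nat) : Int) - 1) (-1) (-1)
        = (m : Int) :: PySem.List.pyRange ((m : Int) - 1) (-1) (-1) := by
      have := PySem.List.pyRange_neg_one_cons (a := (m : Int)) (b := -1) (by omega)
      push_cast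
      simpa using this
    rw [hcons, List.foldl_cons]
    have hc : PySem.List.pyGetD cl (m : Int) 0 = cl[m] := by
      rw [PySem.List.pyGetD_natCast]
      exact List.getD_eq_getElem cl 0 hmlt
    have hsum : (cl.take (m+1)).sum = (cl.take m).sum + cl[m] :=
      List.sum_take_succ cl m hmlt
    have hpos : ((m + 1 : Nat) : Int) - 1 + (cl.take (m+1)).sum = (m : Int) + (cl.take (m+1)).sum := by
      push_cast; ring
    have hpos' : (m : Int) + (cl.take (m+1)).sum - (1 + cl[m]) = (m : Int) - 1 + (cl.take m).sum := by
      rw [hsum]; ring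
    simp only [hpos, hc, hpos']
    rw [ih (Nat.le_of_succ_le hm)]
    simp only [List.range_succ, List.map_append, List.map_cons, List.map_nil,
      List.reverse_append, List.reverse_cons, List.reverse_nil, List.nil_append,
      List.append_assoc, List.cons_append, pvEntry]

theorem end_list_function_spec_aux (kl : List (List (String × String))) (cl sl : List Int)
    (hlen : sl.length ≤ cl.length) :
    end_list_function kl cl sl = end_list_function_alt kl cl sl := by
  unfold end_list_function end_list_function_alt
  have hslice : (PySem.List.slice cl none (some (sl.length : Int))).sum
      = (cl.take sl.length).sum := by
    rw [PySem.List.slice_to_natCast]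
  simp only [pv_A_fold kl cl sl.length hlen, hslice, pv_B_fold kl cl sl.length hlen [],
    List.nil_append, List.reverse_reverse]

-- ===== VERDICT (by name: the statement is the Claim_ definition above) =====
theorem end_list_function_spec : Claim_equal_end_list_function := by
  intro kl cl sl _hdom hpre
  exact end_list_function_spec_aux kl cl sl hpre.1
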